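-- pv_equiv track=rewrite | github.com/lorenzialessandro/NLU-exam | NLU/part_2/functions.py | process_token
-- ===== SOURCE A (Python) =====
-- def process_token(token):
--     res_token = []
--
--     for word in token:
--         if "'" in word:
--             tmp = ""
--             for w in word:
--                 if w != "'":
--                     tmp += w
--                 else:
--                     if tmp:
--                         res_token.append(tmp)
--                         tmp = ""
--                     res_token.append('O')
--             if tmp:
--                 res_token.append(tmp)
--         else:
--             res_token.append(word)
--
--     return res_token
-- ===== SOURCE B (Python) =====
-- def process_token(token):
--     res_token = []
--     for word in token:
--         if "'" in word:
--             pieces = word.split("'")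
--             if pieces[0]:
--                 res_token.append(pieces[0])
--             for piece in pieces[1:]:
--                 res_token.append('O')
--                 if piece:
--                     res_token.append(piece)
--         else:
--             res_token.append(word)
--     return res_token
-- ===== Notes on version B (the rewrite author's own statement) =====
-- stated objective: idiomatic
-- what changed: Replaces A's char-by-char buffer-flush scan inside each word with str.split("'") followed by an interleaving pass over the pieces (first piece if non-empty, then 'O' plus each later non-empty piece).
import Mathlib
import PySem

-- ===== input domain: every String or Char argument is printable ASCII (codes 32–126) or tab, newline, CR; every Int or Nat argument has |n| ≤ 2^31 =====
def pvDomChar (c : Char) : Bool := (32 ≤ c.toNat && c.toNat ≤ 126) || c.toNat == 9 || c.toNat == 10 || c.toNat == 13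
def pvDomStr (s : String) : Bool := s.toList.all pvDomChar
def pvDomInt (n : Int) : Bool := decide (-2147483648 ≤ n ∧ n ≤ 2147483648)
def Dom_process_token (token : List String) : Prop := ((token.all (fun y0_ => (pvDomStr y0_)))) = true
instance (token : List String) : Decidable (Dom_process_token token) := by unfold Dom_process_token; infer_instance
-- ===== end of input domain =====

-- B replaces A's char-by-char buffer-flush scan by split-on-apostrophe followed by an
-- interleaving pass over the pieces (objective: idiomatic; same cost).

-- ===== PORT A =====
-- inner char loop of A: state = (res_token so far, tmp buffer)
def pvStepA (st : List String × List Char) (c : Char) : List String × List Char :=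
  if c ≠ '\'' then (st.1, st.2 ++ [c])
  else ((if st.2 ≠ [] then st.1 ++ [String.ofList st.2] else st.1) ++ ["O"], [])

def process_token (token : List String) : List String :=
  token.foldl (fun res word =>
    if PySem.Str.isIn "'" word then
      let st := word.toList.foldl pvStepA (res, [])
      if st.2 ≠ [] then st.1 ++ [String.ofList st.2] else st.1
    else res ++ [word]) []

-- ===== PORT B =====
def process_token_alt (token : List String) : List String :=
  token.foldl (fun res word =>
    if PySem.Str.isIn "'" word then
      let ps := word.toList.splitOn '\''      -- word.split("'"); always nonempty
      let res1 := if ps.headI ≠ [] then res ++ [String.ofList ps.headI] else res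
      ps.tail.foldl (fun r p =>
        let r := r ++ ["O"]
        if p ≠ [] then r ++ [String.ofList p] else r) res1
    else res ++ [word]) []

-- ===== PRECONDITION & SPEC =====
def Spec_process_token (token : List String) (out : List String) : Prop := out = process_token_alt token
instance (token : List String) (out : List String) : Decidable (Spec_process_token token out) := by unfold Spec_process_token; infer_instance

-- ===== CLAIM (what is proved, stated in full; the proofs are below) =====
def Claim_equal_process_token : Prop := ∀ (token : List String), Dom_process_token token → Spec_process_token token (process_token token)

-- ===== LEMMAS AND PROOFS =====

-- what B's inner loop appends for the pieces after the first
def pvTailOut (ps : List (List Char)) : List String :=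
  ps.flatMap (fun p => "O" :: (if p ≠ [] then [String.ofList p] else []))

theorem pvTailFoldl (ps : List (List Char)) (r0 : List String) :
    ps.foldl (fun r p =>
      let r := r ++ ["O"]
      if p ≠ [] then r ++ [String.ofList p] else r) r0 = r0 ++ pvTailOut ps := by
  induction ps generalizing r0 with
  | nil => simp [pvTailOut]
  | cons p ps ih =>
      simp only [List.foldl_cons, pvTailOut, List.flatMap_cons, ih]
      by_cases hp : p = [] <;> simp [hp]

-- A's buffer-flush scan computes B's split-and-interleave result
theorem pvScanA (cs : List Char) (res : List String) (tmp : List Char) :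
    (let st := cs.foldl pvStepA (res, tmp);
     if st.2 ≠ [] then st.1 ++ [String.ofList st.2] else st.1)
    = (if (tmp ++ (cs.splitOn '\'').headI) ≠ []
         then res ++ [String.ofList (tmp ++ (cs.splitOn '\'').headI)] else res)
      ++ pvTailOut (cs.splitOn '\'').tail := by
  induction cs generalizing res tmp with
  | nil => simp [List.splitOn, pvTailOut]
  | cons c cs ih =>
      by_cases hc : c = '\''
      · subst hc
        have hsplit : List.splitOn '\'' ('\'' :: cs) = [] :: List.splitOn '\'' cs := by
          simp [List.splitOn, List.splitOnP_cons]
        obtain ⟨p0, rest, hps⟩ : ∃ p0 rest, List.splitOn '\'' cs = p0 :: rest := by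
          rcases h : List.splitOn '\'' cs with _ | ⟨p0, rest⟩
          · exact absurd h (by simpa [List.splitOn] using List.splitOnP_ne_nil (fun x => x == '\'') cs)
          · exact ⟨p0, rest, rfl⟩
        simp only [List.foldl_cons, pvStepA, if_neg (by decide : ¬('\'' ≠ '\'')), ih, hsplit, hps,
          List.headI, List.tail]
        by_cases htmp : tmp = [] <;> by_cases hp0 : p0 = [] <;>
          simp [htmp, hp0, pvTailOut]
      · have hsplit : List.splitOn '\'' (c :: cs) = (List.splitOn '\'' cs).modifyHead (List.cons c) := by
          simp [List.splitOn, List.splitOnP_cons, hc]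
        obtain ⟨p0, rest, hps⟩ : ∃ p0 rest, List.splitOn '\'' cs = p0 :: rest := by
          rcases h : List.splitOn '\'' cs with _ | ⟨p0, rest⟩
          · exact absurd h (by simpa [List.splitOn] using List.splitOnP_ne_nil (fun x => x == '\'') cs)
          · exact ⟨p0, rest, rfl⟩
        simp only [List.foldl_cons, pvStepA, if_pos hc, hsplit, hps,
          List.modifyHead, List.headI, List.tail]
        simpa [hps] using ih res (tmp ++ [c])

theorem process_token_spec_aux : ∀ (token : List String),
    process_token token = process_token_alt token := by
  intro token
  unfold process_token process_token_alt
  refine PySem.List.foldl_congr_mem _ _ _ _ ?_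
  intro res word _
  by_cases h : PySem.Str.isIn "'" word = true
  · rw [if_pos h, if_pos h, pvTailFoldl]
    simpa using pvScanA word.toList res []
  · rw [if_neg h, if_neg h]

-- ===== VERDICT (by name: the statement is the Claim_ definition above) =====
theorem process_token_spec : Claim_equal_process_token := by
  intro token _
  unfold Spec_process_token
  exact process_token_spec_aux token
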